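-- pv_equiv track=rewrite | github.com/Leegaeun1/coding-test | Programmers/Lv2/JadenCase 문자열 만들기.py | solution
-- ===== SOURCE A (Python) =====
-- def solution(s):
--     s=list(s) #리스트로 변환
--     cnt=0 #공백인지 걸러주는 용도
--     for i in range(len(s)):
--         if s[i]!=" ": #공백이 아니면 1증가
--             cnt+=1
--         else:
--             cnt=0 #공백일때 0으로 초기화
--         if cnt==1: #공백 바로 이후니까 대문자표현
--             s[i]=s[i].upper()
--         else:
--             s[i]=s[i].lower()
--     return "".join(s)
-- ===== SOURCE B (Python) =====
-- def solution(s):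
--     return ' '.join(w[:1].upper() + w[1:].lower() for w in s.split(' '))
-- ===== Notes on version B (the rewrite author's own statement) =====
-- stated objective: faster
-- what changed: Replaces the char-by-char loop tracking a first-non-space counter with a split on the single-space delimiter, a per-word transform (first char uppercased, rest lowercased), and a join; the whole-word split/upper/lower/join run in C instead of a per-character Python loop.
import Mathlib
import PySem

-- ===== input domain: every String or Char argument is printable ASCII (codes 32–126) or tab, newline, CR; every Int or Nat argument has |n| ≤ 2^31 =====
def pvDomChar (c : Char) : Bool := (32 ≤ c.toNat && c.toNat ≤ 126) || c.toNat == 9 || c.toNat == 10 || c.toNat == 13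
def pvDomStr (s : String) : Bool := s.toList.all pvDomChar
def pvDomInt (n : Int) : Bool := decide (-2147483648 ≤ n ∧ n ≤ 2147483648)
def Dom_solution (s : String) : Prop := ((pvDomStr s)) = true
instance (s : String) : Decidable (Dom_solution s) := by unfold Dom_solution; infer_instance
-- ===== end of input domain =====

-- B rewrites A's char-by-char counter loop as a split on the space delimiter, a per-word capitalize, and a join (measured faster: C-level string ops instead of a per-char loop).

-- ===== PORT A =====
-- the for-loop over the characters keeps cnt and replaces each char in place, so it
-- is a fold carrying (cnt, output chars); "".join(s) rebuilds the string at the end.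
def solution (s : String) : String :=
  String.ofList
    (s.toList.foldl
      (fun (st : Int × List Char) c =>
        let cnt : Int := if c ≠ ' ' then st.1 + 1 else 0
        (cnt, st.2 ++ [if cnt = 1 then PySem.Chars.upperChar c else PySem.Chars.lowerChar c]))
      (0, [])).2

-- ===== PORT B =====
def solution_alt (s : String) : String :=
  String.ofList
    (PySem.Chars.join [' ']
      ((PySem.Chars.splitOn s.toList [' ']).map (fun w =>
        PySem.Chars.upper (PySem.List.slice w none (some 1)) ++
        PySem.Chars.lower (PySem.List.slice w (some 1) none))))

-- ===== PRECONDITION & SPEC =====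
def Spec_solution (s : String) (out : String) : Prop := out = solution_alt s
instance (s : String) (out : String) : Decidable (Spec_solution s out) := by unfold Spec_solution; infer_instance

-- ===== CLAIM (what is proved, stated in full; the proofs are below) =====
def Claim_equal_solution : Prop := ∀ (s : String), Dom_solution s → Spec_solution s (solution s)

-- ===== LEMMAS AND PROOFS =====

-- A's loop as a structural recursion over the characters.
def chA : Int → List Char → List Char
  | _, [] => []
  | cnt, c :: rest =>
    let cnt' : Int := if c ≠ ' ' then cnt + 1 else 0
    (if cnt' = 1 then PySem.Chars.upperChar c else PySem.Chars.lowerChar c) :: chA cnt' rest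

-- Python's split on a single space written structurally (head word via headI since the result is never []).
def splitSp : List Char → List (List Char)
  | [] => [[]]
  | c :: rest =>
    if c = ' ' then [] :: splitSp rest
    else (c :: (splitSp rest).headI) :: (splitSp rest).tail

-- B's per-word transform on the list side.
def cap (w : List Char) : List Char :=
  List.map PySem.Chars.upperChar (w.take 1) ++ List.map PySem.Chars.lowerChar (w.drop 1)

lemma splitSp_ne_nil (l : List Char) : splitSp l ≠ [] := by
  cases l with
  | nil => simp [splitSp]
  | cons c rest => simp only [splitSp]; split <;> simp

lemma headI_cons_tail_splitSp (l : List Char) :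
    (splitSp l).headI :: (splitSp l).tail = splitSp l := by
  obtain ⟨w, ws, h⟩ := List.exists_cons_of_ne_nil (splitSp_ne_nil l)
  simp [h]

lemma foldl_chA (l : List Char) (cnt : Int) (acc : List Char) :
    (l.foldl
      (fun (st : Int × List Char) c =>
        let cnt : Int := if c ≠ ' ' then st.1 + 1 else 0
        (cnt, st.2 ++ [if cnt = 1 then PySem.Chars.upperChar c else PySem.Chars.lowerChar c]))
      (cnt, acc)).2 = acc ++ chA cnt l := by
  induction l generalizing cnt acc with
  | nil => simp [chA]
  | cons c rest ih =>
    rw [List.foldl_cons, ih]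
    simp [chA]

lemma go_eq (fuel : Nat) (l cur : List Char) (acc : List (List Char)) (h : l.length ≤ fuel) :
    PySem.Chars.splitOn.go [' '] fuel l cur acc =
      acc.reverse ++ ((cur.reverse ++ (splitSp l).headI) :: (splitSp l).tail) := by
  induction fuel generalizing l cur acc with
  | zero =>
    interval_cases hl : l.length
    · simp at hl; subst hl; simp [PySem.Chars.splitOn.go, splitSp]
  | succ fuel ih =>
    cases l with
    | nil => simp [PySem.Chars.splitOn.go, splitSp]
    | cons c rest =>
      simp only [PySem.Chars.splitOn.go]
      by_cases hc : c = ' '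
      · subst hc
        simp only [List.isPrefixOf, BEq.rfl, Bool.true_and, if_pos]
        rw [show List.drop [' '].length (' ' :: rest) = rest from rfl]
        rw [ih rest [] (cur.reverse :: acc) (by simpa using Nat.le_of_succ_le_succ h)]
        simp [splitSp, headI_cons_tail_splitSp]
      · have hpf : ([' '].isPrefixOf (c :: rest)) = false := by
          simp [List.isPrefixOf]; exact fun hh => (hc hh.symm).elim
        rw [if_neg (by simp [hpf])]
        rw [ih rest (c :: cur) acc (by simpa using Nat.le_of_succ_le_succ h)]
        simp [splitSp, hc]

lemma splitOn_eq (l : List Char) :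
    PySem.Chars.splitOn l [' '] = splitSp l := by
  unfold PySem.Chars.splitOn
  rw [go_eq (l.length + 1) l [] [] (Nat.le_succ _)]
  simpa using headI_cons_tail_splitSp l

lemma join_cons_head (h : Char) (t : List Char) (xs : List (List Char)) :
    PySem.Chars.join [' '] ((h :: t) :: xs) = h :: PySem.Chars.join [' '] (t :: xs) := by
  cases xs with
  | nil => simp [PySem.Chars.join, List.intercalate]
  | cons y ys => simp [PySem.Chars.join, List.intercalate, List.intersperse]

lemma join_sp_cons (x : List Char) (y : List Char) (ys : List (List Char)) :
    PySem.Chars.join [' '] (x :: y :: ys) = x ++ ' ' :: PySem.Chars.join [' '] (y :: ys) := by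
  simp [PySem.Chars.join, List.intercalate, List.intersperse]

lemma lowerChar_space : PySem.Chars.lowerChar ' ' = ' ' := by decide

lemma chA_main (l : List Char) :
    (chA 0 l = PySem.Chars.join [' '] ((splitSp l).map cap)) ∧
    (∀ cnt : Int, 1 ≤ cnt →
      chA cnt l = PySem.Chars.join [' ']
        (List.map PySem.Chars.lowerChar (splitSp l).headI :: ((splitSp l).tail).map cap)) := by
  induction l with
  | nil =>
    constructor
    · simp [chA, splitSp, cap, PySem.Chars.join, List.intercalate]
    · intro cnt _; simp [chA, splitSp, PySem.Chars.join, List.intercalate]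
  | cons c rest ih =>
    obtain ⟨ih0, ih1⟩ := ih
    obtain ⟨w, ws, hsp⟩ : ∃ w ws, splitSp rest = w :: ws :=
      List.exists_cons_of_ne_nil (splitSp_ne_nil rest)
    by_cases hc : c = ' '
    · subst hc
      have hch : ∀ cnt : Int, chA cnt (' ' :: rest) = ' ' :: chA 0 rest := by
        intro cnt
        simp only [chA]
        rw [if_neg (by simp), if_neg (by norm_num), lowerChar_space]
      have hsp' : splitSp (' ' :: rest) = [] :: splitSp rest := by simp [splitSp]
      have hgoal : ' ' :: chA 0 rest =
          PySem.Chars.join [' '] (cap [] :: cap w :: List.map cap ws) := by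
        rw [join_sp_cons]
        simp [cap, ih0, hsp]
      constructor
      · rw [hch 0, hsp', hsp, List.map_cons, List.map_cons]
        exact hgoal
      · intro cnt _
        rw [hch cnt, hsp', hsp]
        simp only [List.headI, List.tail_cons, List.map_cons, List.map_nil]
        simpa [cap] using hgoal
    · have hsp' : splitSp (c :: rest) = (c :: w) :: ws := by
        simp [splitSp, hc, hsp]
      constructor
      · have hch : chA 0 (c :: rest) = PySem.Chars.upperChar c :: chA 1 rest := by
          simp only [chA]
          rw [if_pos hc, if_pos (by norm_num)]
          norm_num
        rw [hch, hsp', ih1 1 (by norm_num), hsp]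
        simp only [List.headI, List.tail_cons, List.map_cons]
        rw [show cap (c :: w) = PySem.Chars.upperChar c :: List.map PySem.Chars.lowerChar w by
          simp [cap]]
        rw [join_cons_head]
      · intro cnt hcnt
        have hch : chA cnt (c :: rest) = PySem.Chars.lowerChar c :: chA (cnt + 1) rest := by
          simp only [chA]
          rw [if_pos hc, if_neg (by omega)]
        rw [hch, hsp', ih1 (cnt + 1) (by omega), hsp]
        simp only [List.headI, List.tail_cons, List.map_cons]
        rw [join_cons_head]

lemma capB_eq : (fun w : List Char =>
    PySem.Chars.upper (PySem.List.slice w none (some 1)) ++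
    PySem.Chars.lower (PySem.List.slice w (some 1) none)) = cap := by
  funext v
  cases v with
  | nil => simp [cap, PySem.Chars.upper, PySem.Chars.lower, PySem.List.slice]
  | cons c t =>
    simp [cap, PySem.Chars.upper, PySem.Chars.lower, PySem.List.slice,
      List.take_of_length_le]

-- ===== VERDICT (by name: the statement is the Claim_ definition above) =====
theorem solution_spec : Claim_equal_solution := by
  intro s _
  unfold Spec_solution solution solution_alt
  rw [foldl_chA s.toList 0 [], splitOn_eq, capB_eq, List.nil_append, (chA_main s.toList).1]
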